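-- pv_equiv track=rewrite | github.com/zeyygt/automated-sustainability-report-generation-with-carbon-footprint-estimation-using-RAG | rag_retrieval/parsing.py | _non_empty_row_segments
-- ===== SOURCE A (Python) =====
-- def _non_empty_row_segments(rows: list[tuple[int, list[str]]]) -> list[list[tuple[int, list[str]]]]:
--     segments: list[list[tuple[int, list[str]]]] = []
--     current: list[tuple[int, list[str]]] = []
--     for row_index, row_values in rows:
--         if any(value.strip() for value in row_values):
--             current.append((row_index, row_values))
--             continue
--         if current:
--             segments.append(current)
--             current = []
--     if current:
--         segments.append(current)
--     return segments
-- ===== SOURCE B (Python) =====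
-- def _non_empty_row_segments(rows: list[tuple[int, list[str]]]) -> list[list[tuple[int, list[str]]]]:
--     def has_content(row):
--         return any(value.strip() for value in row[1])
--     segments: list[list[tuple[int, list[str]]]] = []
--     i, n = 0, len(rows)
--     while i < n:
--         if not has_content(rows[i]):
--             i += 1
--             continue
--         j = i + 1
--         while j < n and has_content(rows[j]):
--             j += 1
--         segments.append(rows[i:j])
--         i = j
--     return segments
-- ===== Notes on version B (the rewrite author's own statement) =====
-- stated objective: alternative
-- what changed: B finds each maximal run of non-empty rows with a two-pointer index scan and appends the whole slice rows[i:j] at once, instead of A's element-by-element 'current' buffer with two flush sites.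
import Mathlib
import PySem

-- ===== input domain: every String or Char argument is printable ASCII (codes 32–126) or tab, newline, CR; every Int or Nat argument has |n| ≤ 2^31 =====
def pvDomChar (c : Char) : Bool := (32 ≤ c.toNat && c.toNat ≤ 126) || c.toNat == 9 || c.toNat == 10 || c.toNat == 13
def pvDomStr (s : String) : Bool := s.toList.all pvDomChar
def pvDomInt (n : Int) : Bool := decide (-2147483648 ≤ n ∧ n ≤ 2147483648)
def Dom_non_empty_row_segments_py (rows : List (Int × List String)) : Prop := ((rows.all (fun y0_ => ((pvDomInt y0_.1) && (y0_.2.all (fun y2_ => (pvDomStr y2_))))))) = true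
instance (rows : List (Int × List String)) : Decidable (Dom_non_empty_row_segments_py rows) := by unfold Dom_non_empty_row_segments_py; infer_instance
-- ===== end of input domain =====

-- B replaces A's element-by-element 'current' buffer (two flush sites) by a two-pointer scan
-- that emits each maximal run of non-empty rows as one slice; same O(n) cost, return values equal.


-- shared helper: Python's `any(value.strip() for value in row_values)`
def rowHasContent (r : Int × List String) : Bool :=
  r.2.any (fun v => PySem.Str.strip v != "")

-- ===== PORT A =====
-- fold over rows with state (segments, current); final flush after the loop
def non_empty_row_segments_py (rows : List (Int × List String)) : List (List (Int × List String)) :=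
  let st := rows.foldl
    (fun (st : List (List (Int × List String)) × List (Int × List String)) row =>
      if rowHasContent row then (st.1, st.2 ++ [row])
      else if st.2 ≠ [] then (st.1 ++ [st.2], []) else st)
    ([], [])
  if st.2 ≠ [] then st.1 ++ [st.2] else st.1

-- ===== PORT B =====
-- Source B's two-pointer scan: skip an empty row; at a non-empty row take the whole run
-- (the inner `while j < n and has_content` = takeWhile) and continue after it (dropWhile)
def non_empty_row_segments_py_alt : List (Int × List String) → List (List (Int × List String))
  | [] => []
  | r :: rs =>
    if rowHasContent r then
      (r :: rs.takeWhile rowHasContent) :: non_empty_row_segments_py_alt (rs.dropWhile rowHasContent)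
    else
      non_empty_row_segments_py_alt rs
termination_by l => l.length
decreasing_by
  · exact Nat.lt_succ_of_le (List.length_dropWhile_le ..)
  · simp

-- ===== PRECONDITION & SPEC =====
def Spec_non_empty_row_segments_py (rows : List (Int × List String)) (out : List (List (Int × List String))) : Prop := out = non_empty_row_segments_py_alt rows
instance (rows : List (Int × List String)) (out : List (List (Int × List String))) : Decidable (Spec_non_empty_row_segments_py rows out) := by unfold Spec_non_empty_row_segments_py; infer_instance

-- ===== CLAIM (what is proved, stated in full; the proofs are below) =====
def Claim_equal_non_empty_row_segments_py : Prop := ∀ (rows : List (Int × List String)), Dom_non_empty_row_segments_py rows → Spec_non_empty_row_segments_py rows (non_empty_row_segments_py rows)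

-- ===== LEMMAS AND PROOFS =====

-- A's loop body, named for the proofs
def segStep (st : List (List (Int × List String)) × List (Int × List String))
    (row : Int × List String) :
    List (List (Int × List String)) × List (Int × List String) :=
  if rowHasContent row then (st.1, st.2 ++ [row])
  else if st.2 ≠ [] then (st.1 ++ [st.2], []) else st

-- the tail of A's computation, with the pending buffer made explicit
def goSeg (cur : List (Int × List String)) :
    List (Int × List String) → List (List (Int × List String))
  | [] => if cur = [] then [] else [cur]
  | r :: rs =>
    if rowHasContent r then goSeg (cur ++ [r]) rs
    else if cur = [] then goSeg [] rs else cur :: goSeg [] rs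

theorem fold_goSeg (rows : List (Int × List String))
    (segs : List (List (Int × List String))) (cur : List (Int × List String)) :
    (let st := rows.foldl segStep (segs, cur)
     if st.2 ≠ [] then st.1 ++ [st.2] else st.1) = segs ++ goSeg cur rows := by
  induction rows generalizing segs cur with
  | nil =>
    simp only [List.foldl_nil, goSeg]
    by_cases h : cur = [] <;> simp [h]
  | cons r rs ih =>
    simp only [List.foldl_cons, goSeg, segStep]
    by_cases hr : rowHasContent r
    · simpa [hr] using ih segs (cur ++ [r])
    · by_cases hc : cur = []
      · simpa [hr, hc] using ih segs []
      · simpa [hr, hc] using ih (segs ++ [cur]) []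

theorem goSeg_eq_alt (rows : List (Int × List String)) :
    goSeg [] rows = non_empty_row_segments_py_alt rows ∧
    ∀ cur : List (Int × List String), cur ≠ [] →
      goSeg cur rows =
        (cur ++ rows.takeWhile rowHasContent) ::
          non_empty_row_segments_py_alt (rows.dropWhile rowHasContent) := by
  induction rows with
  | nil =>
    refine ⟨by simp [goSeg, non_empty_row_segments_py_alt], ?_⟩
    intro cur hcur
    simp [goSeg, non_empty_row_segments_py_alt, hcur]
  | cons r rs ih =>
    by_cases hr : rowHasContent r
    · constructor
      · rw [show goSeg [] (r :: rs) = goSeg [r] rs by simp [goSeg, hr]]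
        rw [(ih.2 [r] (by simp)), non_empty_row_segments_py_alt]
        simp [hr]
      · intro cur hcur
        rw [show goSeg cur (r :: rs) = goSeg (cur ++ [r]) rs by simp [goSeg, hr]]
        rw [ih.2 (cur ++ [r]) (by simp)]
        simp [hr]
    · constructor
      · rw [show goSeg [] (r :: rs) = goSeg [] rs by simp [goSeg, hr]]
        rw [ih.1, non_empty_row_segments_py_alt]
        simp [hr]
      · intro cur hcur
        rw [show goSeg cur (r :: rs) = cur :: goSeg [] rs by simp [goSeg, hr, hcur]]
        rw [ih.1]
        conv_rhs => rw [non_empty_row_segments_py_alt.eq_def]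
        simp [hr]

-- ===== VERDICT (by name: the statement is the Claim_ definition above) =====
theorem non_empty_row_segments_py_spec : Claim_equal_non_empty_row_segments_py := by
  intro rows _
  unfold Spec_non_empty_row_segments_py
  have h := fold_goSeg rows [] []
  simp only [List.nil_append] at h
  calc non_empty_row_segments_py rows
      = goSeg [] rows := by
        rw [← h]; rfl
    _ = non_empty_row_segments_py_alt rows := (goSeg_eq_alt rows).1
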